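-- pv_equiv track=rewrite | github.com/vialogos/viarah | core/management/commands/bootstrap_v1.py | _split_scopes
-- ===== SOURCE A (Python) =====
-- def _split_scopes(scopes: list[str] | None) -> list[str] | None:
--     if scopes is None:
--         return None
--
--     flattened: list[str] = []
--     for raw in scopes:
--         for part in str(raw).split(","):
--             cleaned = part.strip()
--             if cleaned:
--                 flattened.append(cleaned)
--     return flattened
-- ===== SOURCE B (Python) =====
-- def _split_scopes(scopes):
--     if scopes is None:
--         return None
--     s = ",".join(str(r) for r in scopes)
--     return [p.strip() for p in s.split(",") if p.strip()]
-- ===== Notes on version B (the rewrite author's own statement) =====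
-- stated objective: alternative
-- what changed: Replaces the nested per-element/per-part append loop by one comma-join of the whole list followed by a single flat split-strip-filter pass.
import Mathlib
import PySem

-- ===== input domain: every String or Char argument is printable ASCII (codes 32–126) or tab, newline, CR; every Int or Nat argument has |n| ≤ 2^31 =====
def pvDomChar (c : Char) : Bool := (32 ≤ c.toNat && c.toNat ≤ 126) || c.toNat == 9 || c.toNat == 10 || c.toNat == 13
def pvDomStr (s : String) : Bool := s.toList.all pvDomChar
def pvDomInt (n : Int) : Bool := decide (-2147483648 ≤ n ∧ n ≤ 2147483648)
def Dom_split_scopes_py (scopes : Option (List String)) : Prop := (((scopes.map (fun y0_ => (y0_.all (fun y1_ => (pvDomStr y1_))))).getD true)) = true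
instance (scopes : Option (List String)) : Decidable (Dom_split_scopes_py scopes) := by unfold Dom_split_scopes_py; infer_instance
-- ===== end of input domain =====

-- B replaces the nested per-element/per-part append loop by one comma-join of the
-- whole list followed by a single flat split-strip-filter pass (alternative decomposition).


-- s.split(",") for the literal nonempty separator ",": exactly PySem.Chars.splitOn on the code points
def strSplitComma (s : String) : List String :=
  (PySem.Chars.splitOn s.toList [',']).map String.ofList

-- ===== PORT A =====
def split_scopes_py (scopes : Option (List String)) : Option (List String) :=
  match scopes with
  | none => none
  | some xs =>
      some (xs.foldl (fun flattened raw =>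
        (strSplitComma raw).foldl (fun fl part =>
          let cleaned := PySem.Str.strip part
          if cleaned ≠ "" then fl ++ [cleaned] else fl) flattened) [])

-- ===== PORT B =====
def split_scopes_py_alt (scopes : Option (List String)) : Option (List String) :=
  match scopes with
  | none => none
  | some xs =>
      let s := PySem.Str.join "," xs
      some ((strSplitComma s).filterMap (fun p =>
        let c := PySem.Str.strip p
        if c ≠ "" then some c else none))

-- ===== PRECONDITION & SPEC =====
def Spec_split_scopes_py (scopes : Option (List String)) (out : Option (List String)) : Prop := out = split_scopes_py_alt scopes
instance (scopes : Option (List String)) (out : Option (List String)) : Decidable (Spec_split_scopes_py scopes out) := by unfold Spec_split_scopes_py; infer_instance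

-- ===== CLAIM (what is proved, stated in full; the proofs are below) =====
def Claim_equal_split_scopes_py : Prop := ∀ (scopes : Option (List String)), Dom_split_scopes_py scopes → Spec_split_scopes_py scopes (split_scopes_py scopes)

-- ===== LEMMAS AND PROOFS =====

-- structural single-char comma split
def spC : List Char → List (List Char)
  | [] => [[]]
  | d :: rest => if d = ',' then [] :: spC rest else (spC rest).modifyHead (d :: ·)

lemma spC_ne_nil (l : List Char) : spC l ≠ [] := by
  induction l with
  | nil => simp [spC]
  | cons d rest ih =>
      simp only [spC]
      split_ifs
      · simp
      · cases h : spC rest with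
        | nil => exact absurd h ih
        | cons p ps => simp [List.modifyHead]

lemma splitOn_go_eq : ∀ (fuel : Nat) (l cur : List Char) (acc : List (List Char)),
    l.length ≤ fuel →
    PySem.Chars.splitOn.go [','] fuel l cur acc =
      acc.reverse ++ (spC l).modifyHead (cur.reverse ++ ·) := by
  intro fuel
  induction fuel with
  | zero =>
      intro l cur acc h
      have : l = [] := List.eq_nil_of_length_eq_zero (Nat.le_zero.mp h)
      subst this
      simp [PySem.Chars.splitOn.go, spC, List.modifyHead]
  | succ n ih =>
      intro l cur acc h
      cases l with
      | nil => simp [PySem.Chars.splitOn.go, spC, List.modifyHead]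
      | cons d rest =>
          by_cases hd : d = ','
          · subst hd
            rw [show PySem.Chars.splitOn.go [','] (n+1) (',' :: rest) cur acc
                  = PySem.Chars.splitOn.go [','] n rest [] (cur.reverse :: acc) by
                simp [PySem.Chars.splitOn.go, List.isPrefixOf]]
            rw [ih rest [] (cur.reverse :: acc) (by simpa using Nat.le_of_succ_le_succ h)]
            simp only [spC, List.modifyHead, List.reverse_cons, List.nil_append,
              List.append_assoc, List.cons_append]
            cases spC rest <;> simp
          · rw [show PySem.Chars.splitOn.go [','] (n+1) (d :: rest) cur acc
                  = PySem.Chars.splitOn.go [','] n rest (d :: cur) acc by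
                simp only [PySem.Chars.splitOn.go, List.isPrefixOf, Bool.and_true, beq_iff_eq]
                rw [if_neg (fun hdd => hd hdd.symm)]]
            rw [ih rest (d :: cur) acc (by simpa using Nat.le_of_succ_le_succ h)]
            cases hs : spC rest with
            | nil => exact absurd hs (spC_ne_nil rest)
            | cons p ps => simp [spC, hd, hs, List.modifyHead]

lemma splitOn_eq_spC (l : List Char) : PySem.Chars.splitOn l [','] = spC l := by
  unfold PySem.Chars.splitOn
  rw [splitOn_go_eq (l.length + 1) l [] [] (Nat.le_succ _)]
  cases hs : spC l with
  | nil => exact absurd hs (spC_ne_nil l)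
  | cons p ps => simp [List.modifyHead]

lemma spC_append (a b : List Char) : spC (a ++ ',' :: b) = spC a ++ spC b := by
  induction a with
  | nil => simp [spC]
  | cons d rest ih =>
      by_cases hd : d = ','
      · subst hd; simp [spC, ih]
      · cases hs : spC rest with
        | nil => exact absurd hs (spC_ne_nil rest)
        | cons p ps => simp [spC, hd, ih, hs, List.modifyHead]

lemma spC_join (x : List Char) (xs : List (List Char)) :
    spC (PySem.Chars.join [','] (x :: xs)) = spC x ++ xs.flatMap spC := by
  induction xs generalizing x with
  | nil => simp [PySem.Chars.join, List.intercalate]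
  | cons y ys ih =>
      have hj : PySem.Chars.join [','] (x :: y :: ys)
          = x ++ ',' :: PySem.Chars.join [','] (y :: ys) := by
        simp [PySem.Chars.join, List.intercalate]
      rw [hj, spC_append, ih y]
      simp

-- String-level comma split distributes over a comma join
lemma strSplitComma_join (x : String) (xs : List String) :
    strSplitComma (PySem.Str.join "," (x :: xs))
      = strSplitComma x ++ xs.flatMap strSplitComma := by
  unfold strSplitComma
  rw [PySem.Str.toList_join]
  have : (",".toList) = [','] := by decide
  rw [this]
  simp only [List.map_cons]
  rw [splitOn_eq_spC, spC_join]
  simp [splitOn_eq_spC, List.map_flatMap, List.flatMap_map]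

-- B's one-pass clean
def cleanStr (ps : List String) : List String :=
  ps.filterMap (fun p =>
    let c := PySem.Str.strip p
    if c ≠ "" then some c else none)

lemma cleanStr_append (a b : List String) : cleanStr (a ++ b) = cleanStr a ++ cleanStr b := by
  simp [cleanStr]

-- A's inner loop over one raw string equals B's clean of its split
lemma inner_loop_eq (raw : String) (fl : List String) :
    (strSplitComma raw).foldl (fun fl part =>
        let cleaned := PySem.Str.strip part
        if cleaned ≠ "" then fl ++ [cleaned] else fl) fl
      = fl ++ cleanStr (strSplitComma raw) := by
  generalize strSplitComma raw = parts
  induction parts generalizing fl with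
  | nil => simp [cleanStr]
  | cons p ps ih =>
      rw [List.foldl_cons, ih]
      by_cases hc : PySem.Str.strip p ≠ ""
      · simp [cleanStr, hc]
      · simp only [ne_eq, not_not] at hc
        simp [cleanStr, hc]

lemma cleanStr_flatMap (ls : List String) :
    cleanStr (ls.flatMap strSplitComma) = ls.flatMap (fun r => cleanStr (strSplitComma r)) := by
  induction ls with
  | nil => simp [cleanStr]
  | cons y ys ih => simp [List.flatMap_cons, cleanStr_append, ih]

lemma outer_loop_eq (xs : List String) (fl : List String) :
    xs.foldl (fun flattened raw =>
        (strSplitComma raw).foldl (fun fl part =>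
          let cleaned := PySem.Str.strip part
          if cleaned ≠ "" then fl ++ [cleaned] else fl) flattened) fl
      = fl ++ xs.flatMap (fun raw => cleanStr (strSplitComma raw)) := by
  induction xs generalizing fl with
  | nil => simp
  | cons x rest ih =>
      simp only [List.foldl_cons, List.flatMap_cons]
      rw [inner_loop_eq, ih]
      simp

-- ===== VERDICT (by name: the statement is the Claim_ definition above) =====
theorem split_scopes_py_spec : Claim_equal_split_scopes_py := by
  intro scopes _
  unfold Spec_split_scopes_py
  cases scopes with
  | none => rfl
  | some xs =>
      simp only [split_scopes_py, split_scopes_py_alt]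
      rw [outer_loop_eq, List.nil_append]
      refine congrArg some ?_
      show _ = cleanStr (strSplitComma (PySem.Str.join "," xs))
      cases xs with
      | nil => exact (by decide : cleanStr (strSplitComma (PySem.Str.join "," ([] : List String))) = []).symm
      | cons x rest =>
          rw [strSplitComma_join, cleanStr_append, cleanStr_flatMap]
          simp
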